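-- pv_equiv track=rewrite | github.com/NickArakaki/ds-a-practice | AppAcademyHackerRank/MaxDistinct.py | max_distinct_el
-- ===== SOURCE A (Python) =====
-- def max_distinct_el(a: list[int], b: list[int], k:int) -> int:
--     a_set = set(a)
--     b_set = set(b)
--
--     for b_num in b_set:
--         if len(a_set) == len(a):
--             return len(a)
--
--         if k > 0 and b_num not in a_set:
--             a_set.add(b_num)
--             k -= 1
--
--     return len(a_set)
-- ===== SOURCE B (Python) =====
-- def max_distinct_el(a: list[int], b: list[int], k: int) -> int:
--     da = len(set(a))
--     avail = len(set(b) - set(a))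
--     return da + min(max(k, 0), avail, len(a) - da)
-- ===== Notes on version B (the rewrite author's own statement) =====
-- stated objective: simpler
-- what changed: Replaces the guarded loop over set(b) with early exit by a single closed-form expression: len(set(a)) + min(max(k,0), len(set(b)-set(a)), len(a)-len(set(a))).
import Mathlib
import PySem

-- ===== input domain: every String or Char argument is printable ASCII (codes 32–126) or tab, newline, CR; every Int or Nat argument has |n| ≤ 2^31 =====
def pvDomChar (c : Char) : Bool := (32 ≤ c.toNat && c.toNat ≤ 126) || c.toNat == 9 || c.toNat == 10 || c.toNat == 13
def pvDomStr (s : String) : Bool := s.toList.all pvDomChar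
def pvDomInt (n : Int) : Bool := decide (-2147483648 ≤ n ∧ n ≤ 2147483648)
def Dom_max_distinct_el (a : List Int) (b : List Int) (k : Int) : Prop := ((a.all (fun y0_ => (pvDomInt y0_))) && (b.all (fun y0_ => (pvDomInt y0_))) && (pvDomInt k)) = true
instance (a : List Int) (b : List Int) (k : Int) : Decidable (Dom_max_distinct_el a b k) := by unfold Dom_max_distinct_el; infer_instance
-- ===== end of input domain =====

-- B replaces A's guarded loop over set(b) (with its early exit at len(a)) by one
-- closed-form expression; objective: simpler. The result of A's loop does not depend
-- on set-iteration order, which is what the equivalence proof establishes.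

-- ===== PORT A =====
-- the 'for b_num in b_set' loop with its two guards and early return
def pvLoopA (aLen : Nat) (aset : PySem.Set Int) (k : Int) : List Int → Int
  | [] => (aset.length : Int)                       -- return len(a_set)
  | x :: xs =>
      if aset.length = aLen then (aLen : Int)       -- early exit: return len(a)
      else if k > 0 && !(PySem.Set.contains aset x)
      then pvLoopA aLen (PySem.Set.add aset x) (k - 1) xs
      else pvLoopA aLen aset k xs

def max_distinct_el (a : List Int) (b : List Int) (k : Int) : Int :=
  pvLoopA a.length (PySem.Set.ofList a) k (PySem.Set.ofList b)

-- ===== PORT B =====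
def max_distinct_el_alt (a : List Int) (b : List Int) (k : Int) : Int :=
  let da : Int := (PySem.Set.ofList a).length
  let avail : Int := ((PySem.Set.ofList b).diff (PySem.Set.ofList a)).length
  da + min (max k 0) (min avail ((a.length : Int) - da))

-- ===== PRECONDITION & SPEC =====
def Spec_max_distinct_el (a : List Int) (b : List Int) (k : Int) (out : Int) : Prop := out = max_distinct_el_alt a b k
instance (a : List Int) (b : List Int) (k : Int) (out : Int) : Decidable (Spec_max_distinct_el a b k out) := by unfold Spec_max_distinct_el; infer_instance

-- ===== CLAIM (what is proved, stated in full; the proofs are below) =====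
def Claim_equal_max_distinct_el : Prop := ∀ (a : List Int) (b : List Int) (k : Int), Dom_max_distinct_el a b k → Spec_max_distinct_el a b k (max_distinct_el a b k)

-- ===== LEMMAS AND PROOFS =====

-- closed form of A's loop: starting set size plus the min of the three budgets
theorem pvLoopA_eq (aLen : Nat) (rest : List Int) :
    ∀ (aset : PySem.Set Int) (k : Int), rest.Nodup → aset.Nodup → aset.length ≤ aLen →
    pvLoopA aLen aset k rest =
      (aset.length : Int) +
        min (max k 0)
          (min ((rest.filter (fun x => !(PySem.Set.contains aset x))).length : Int)
               ((aLen : Int) - aset.length)) := by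
  induction rest with
  | nil =>
      intro aset k _ _ hle
      simp [pvLoopA]
      omega
  | cons x xs ih =>
      intro aset k hnd hsetnd hle
      rcases List.nodup_cons.mp hnd with ⟨hxnotin, hxs⟩
      by_cases hfull : aset.length = aLen
      · -- early exit: size already len(a)
        simp [pvLoopA, hfull]
      · have hlt : aset.length < aLen := lt_of_le_of_ne hle hfull
        by_cases hmem : x ∈ aset
        · -- x already in a_set: nothing happens, filter drops x
          have hstep : pvLoopA aLen aset k (x :: xs) = pvLoopA aLen aset k xs := by
            simp [pvLoopA, hfull, hmem]
          rw [hstep, ih aset k hxs hsetnd hle]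
          simp [hmem]
        · by_cases hk : k > 0
          · -- x is new and budget remains: x is added, k decreases
            have hstep : pvLoopA aLen aset k (x :: xs) = pvLoopA aLen (aset.add x) (k - 1) xs := by
              simp [pvLoopA, hfull, hmem, hk]
            have hadd : aset.add x = aset ++ [x] := PySem.Set.add_of_not_mem hmem
            have hndadd : (aset.add x).Nodup := by
              rw [hadd]; exact List.Nodup.append hsetnd (List.nodup_singleton x)
                (by simpa using fun h => hmem h)
            have hlen : (aset.add x).length = aset.length + 1 := by simp [hadd]
            rw [hstep, ih (aset.add x) (k - 1) hxs hndadd (by omega)]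
            -- adding x does not change which elements of xs are new (x ∉ xs)
            have hfiltxs : xs.filter (fun y => !(PySem.Set.contains (aset.add x) y)) =
                xs.filter (fun y => !(PySem.Set.contains aset y)) := by
              apply List.filter_congr
              intro y hy
              have hyx : y ≠ x := fun h => hxnotin (h ▸ hy)
              simp [hadd, hyx]
            rw [hfiltxs, hlen]
            simp [hmem]
            omega
          · -- budget exhausted: nothing more is ever added on either side
            have hstep : pvLoopA aLen aset k (x :: xs) = pvLoopA aLen aset k xs := by
              simp [pvLoopA, hfull, hmem, hk]
            rw [hstep, ih aset k hxs hsetnd hle]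
            rw [List.filter_cons]
            by_cases hx : x ∈ aset <;> simp [hx] <;> omega

-- ===== VERDICT (by name: the statement is the Claim_ definition above) =====
theorem max_distinct_el_spec : Claim_equal_max_distinct_el := by
  intro a b k _
  unfold Spec_max_distinct_el max_distinct_el max_distinct_el_alt
  rw [pvLoopA_eq a.length (PySem.Set.ofList b) (PySem.Set.ofList a) k
      (PySem.Set.nodup_ofList b) (PySem.Set.nodup_ofList a) (PySem.Set.length_ofList_le a)]
  rfl
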